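-- pv_equiv track=rewrite | github.com/samlaihei/PyQSpecFit | PyQSpecFit.py | create_mask_window
-- ===== SOURCE A (Python) =====
-- def create_mask_window(lams, windows):
--     mask = [False for x in lams]
--     for window in windows:
--         wind_lo, wind_hi = window
--         for index, lam in enumerate(lams):
--             if lam > wind_lo and lam < wind_hi:
--                 mask[index] = True
--     return mask
-- ===== SOURCE B (Python) =====
-- # Counting re-implementation: a lam x lies strictly inside some window iff, among the
-- # windows with lo < hi, the number of lo's < x exceeds the number of hi's <= x.
-- # Sort the lo's and hi's once and get both counts per lam by binary search.
--
-- def _bisect_left(a, x):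
--     lo, hi = 0, len(a)
--     while lo < hi:
--         mid = (lo + hi) // 2
--         if a[mid] < x:
--             lo = mid + 1
--         else:
--             hi = mid
--     return lo
--
-- def _bisect_right(a, x):
--     lo, hi = 0, len(a)
--     while lo < hi:
--         mid = (lo + hi) // 2
--         if x < a[mid]:
--             hi = mid
--         else:
--             lo = mid + 1
--     return lo
--
-- def create_mask_window(lams, windows):
--     los = sorted([lo for lo, hi in windows if lo < hi])
--     his = sorted([hi for lo, hi in windows if lo < hi])
--     return [_bisect_left(los, x) > _bisect_right(his, x) for x in lams]
-- ===== Notes on version B (the rewrite author's own statement) =====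
-- stated objective: faster
-- what changed: A rescans all lams for every window while rewriting a mask in place; B sorts the lo and hi boundaries of the nonempty windows once and decides each lam by comparing two binary-searched boundary counts (x is strictly inside some window iff #{lo < x} > #{hi <= x}).
import Mathlib
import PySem

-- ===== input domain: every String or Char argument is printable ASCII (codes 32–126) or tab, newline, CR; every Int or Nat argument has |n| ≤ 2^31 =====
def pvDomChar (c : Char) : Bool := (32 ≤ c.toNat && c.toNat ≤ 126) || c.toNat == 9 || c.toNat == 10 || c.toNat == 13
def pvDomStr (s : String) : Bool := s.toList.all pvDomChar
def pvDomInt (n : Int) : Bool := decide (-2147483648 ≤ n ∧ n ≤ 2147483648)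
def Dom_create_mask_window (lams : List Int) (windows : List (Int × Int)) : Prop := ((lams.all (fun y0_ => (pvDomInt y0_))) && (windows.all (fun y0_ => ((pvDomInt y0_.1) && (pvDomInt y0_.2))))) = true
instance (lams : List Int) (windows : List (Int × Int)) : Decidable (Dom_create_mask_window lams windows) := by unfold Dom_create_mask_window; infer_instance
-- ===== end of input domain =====

-- B replaces A's window-by-window mask rewriting with sorted lo/hi boundary lists and a
-- binary-searched count comparison per lam (objective: faster).

-- ===== PORT A =====
def create_mask_window (lams : List Int) (windows : List (Int × Int)) : List Bool :=
  let mask := lams.map (fun _ => false)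
  windows.foldl
    (fun mask window =>
      let wind_lo := window.1
      let wind_hi := window.2
      (PySem.List.enumerate lams 0).foldl
        (fun mask il =>
          -- mask[index] = True: enumerate indices satisfy 0 ≤ index < |mask|, so List.set is Python's in-range item assignment exactly
          if wind_lo < il.2 ∧ il.2 < wind_hi then mask.set il.1.toNat true else mask)
        mask)
    mask

-- ===== PORT B =====
-- termination facts for the two hand-written binary-search while-loops (cited by name in decreasing_by)
lemma pyBisect_dec_hi (lo hi : Int) (h : lo < hi) :
    (PySem.Int.floordiv (lo + hi) 2 - lo).toNat < (hi - lo).toNat := by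
  have hb := PySem.Int.floordiv_two_mid_bounds (le_of_lt h)
  have hlt : PySem.Int.floordiv (lo + hi) 2 < hi := by
    rw [PySem.Int.floordiv_lt_iff_lt_mul (by omega)]; omega
  omega

lemma pyBisect_dec_lo (lo hi : Int) (h : lo < hi) :
    (hi - (PySem.Int.floordiv (lo + hi) 2 + 1)).toNat < (hi - lo).toNat := by
  have hb := PySem.Int.floordiv_two_mid_bounds (le_of_lt h)
  omega

-- hand-written `_bisect_left` while-loop of Source B (a[mid] is always in range in these calls, so pyGetD is exact)
def pyBisectLeftLoop (a : List Int) (x : Int) (lo hi : Int) : Int :=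
  if h : lo < hi then
    let mid := PySem.Int.floordiv (lo + hi) 2
    if PySem.List.pyGetD a mid 0 < x then pyBisectLeftLoop a x (mid + 1) hi
    else pyBisectLeftLoop a x lo mid
  else lo
termination_by (hi - lo).toNat
decreasing_by
  · exact pyBisect_dec_lo lo hi h
  · exact pyBisect_dec_hi lo hi h

-- hand-written `_bisect_right` while-loop of Source B
def pyBisectRightLoop (a : List Int) (x : Int) (lo hi : Int) : Int :=
  if h : lo < hi then
    let mid := PySem.Int.floordiv (lo + hi) 2
    if x < PySem.List.pyGetD a mid 0 then pyBisectRightLoop a x lo mid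
    else pyBisectRightLoop a x (mid + 1) hi
  else lo
termination_by (hi - lo).toNat
decreasing_by
  · exact pyBisect_dec_hi lo hi h
  · exact pyBisect_dec_lo lo hi h

def pyBisectLeft (a : List Int) (x : Int) : Int := pyBisectLeftLoop a x 0 (a.length : Int)

def pyBisectRight (a : List Int) (x : Int) : Int := pyBisectRightLoop a x 0 (a.length : Int)

def create_mask_window_alt (lams : List Int) (windows : List (Int × Int)) : List Bool :=
  let los := PySem.List.sorted ((windows.filter (fun w => decide (w.1 < w.2))).map (fun w => w.1)) (fun v => v) false
  let his := PySem.List.sorted ((windows.filter (fun w => decide (w.1 < w.2))).map (fun w => w.2)) (fun v => v) false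
  lams.map (fun x => decide (pyBisectRight his x < pyBisectLeft los x))

-- ===== PRECONDITION & SPEC =====
def Spec_create_mask_window (lams : List Int) (windows : List (Int × Int)) (out : List Bool) : Prop := out = create_mask_window_alt lams windows
instance (lams : List Int) (windows : List (Int × Int)) (out : List Bool) : Decidable (Spec_create_mask_window lams windows out) := by unfold Spec_create_mask_window; infer_instance

-- ===== CLAIM (what is proved, stated in full; the proofs are below) =====
def Claim_equal_create_mask_window : Prop := ∀ (lams : List Int) (windows : List (Int × Int)), Dom_create_mask_window lams windows → Spec_create_mask_window lams windows (create_mask_window lams windows)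

-- ===== LEMMAS AND PROOFS =====

-- In a ≤-sorted list a downward-closed predicate holds exactly on a prefix, so
-- `j < countP p a` characterises `p a[j]`.
lemma countP_sorted_char (p : Int → Bool) (hp : ∀ y z : Int, y ≤ z → p z = true → p y = true) :
    ∀ (a : List Int), a.Pairwise (· ≤ ·) →
      ∀ (j : Nat) (hj : j < a.length), (j < a.countP p ↔ p a[j] = true) := by
  intro a
  induction a with
  | nil => intro _ j hj; simp at hj
  | cons y t ih =>
    intro hpw j hj
    rcases List.pairwise_cons.mp hpw with ⟨hy, ht⟩
    by_cases hpy : p y = true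
    · cases j with
      | zero => simp [hpy]
      | succ k =>
        have hk := ih ht k (by simpa using hj)
        simp only [List.countP_cons, hpy, List.getElem_cons_succ, if_pos trivial]
        rw [← hk]
        omega
    · have h0 : (y :: t).countP p = 0 := by
        rw [List.countP_eq_zero]
        intro z hz
        rcases List.mem_cons.mp hz with rfl | hz'
        · simpa using hpy
        · intro hpz; exact hpy (hp y z (hy z hz') hpz)
      rw [h0]
      constructor
      · omega
      · intro hc
        exfalso
        cases j with
        | zero => simp at hc; exact hpy hc
        | succ k =>
          have hk : k < t.length := by simpa using hj
          have hpk : p t[k] = true := by simpa using hc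
          exact hpy (hp y t[k] (hy _ (List.getElem_mem hk)) hpk)

-- the `_bisect_left` loop returns countP (· < x)
lemma pyBisectLeftLoop_eq (a : List Int) (x : Int) (hs : a.Pairwise (· ≤ ·)) :
    ∀ (lo hi : Int), 0 ≤ lo → hi ≤ (a.length : Int) →
      lo ≤ (a.countP (fun y => decide (y < x)) : Int) →
      (a.countP (fun y => decide (y < x)) : Int) ≤ hi →
      pyBisectLeftLoop a x lo hi = (a.countP (fun y => decide (y < x)) : Int) := by
  intro lo hi
  induction lo, hi using pyBisectLeftLoop.induct a x with
  | case1 lo hi h mid hx ih =>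
    intro h0 hlen hlo hhi
    have hb := PySem.Int.floordiv_two_mid_bounds (le_of_lt h)
    have hltm : mid < hi := by
      rw [show mid = PySem.Int.floordiv (lo + hi) 2 from rfl,
        PySem.Int.floordiv_lt_iff_lt_mul (by omega : (0:Int) < 2)]; omega
    have hmn : mid.toNat < a.length := by omega
    have hget : PySem.List.pyGetD a mid 0 = a[mid.toNat] := by
      exact PySem.List.pyGetD_eq_getElem a 0 (by omega) (by omega)
    have hchar := countP_sorted_char (fun y => decide (y < x)) (by intro y z hyz hz; simp at *; omega) a hs mid.toNat hmn
    have hlt' : mid < (a.countP (fun y => decide (y < x)) : Int) := by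
      rw [hget] at hx
      have : mid.toNat < a.countP (fun y => decide (y < x)) := hchar.mpr (by simp; omega)
      omega
    rw [pyBisectLeftLoop]
    simp only [dif_pos h]
    rw [show PySem.Int.floordiv (lo + hi) 2 = mid from rfl, if_pos hx]
    exact ih (by omega) hlen (by omega) hhi
  | case2 lo hi h mid hx ih =>
    intro h0 hlen hlo hhi
    have hb := PySem.Int.floordiv_two_mid_bounds (le_of_lt h)
    have hltm : mid < hi := by
      rw [show mid = PySem.Int.floordiv (lo + hi) 2 from rfl,
        PySem.Int.floordiv_lt_iff_lt_mul (by omega : (0:Int) < 2)]; omega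
    have hmn : mid.toNat < a.length := by omega
    have hget : PySem.List.pyGetD a mid 0 = a[mid.toNat] := by
      exact PySem.List.pyGetD_eq_getElem a 0 (by omega) (by omega)
    have hchar := countP_sorted_char (fun y => decide (y < x)) (by intro y z hyz hz; simp at *; omega) a hs mid.toNat hmn
    have hcle : (a.countP (fun y => decide (y < x)) : Int) ≤ mid := by
      by_contra hcon
      have hmc : mid.toNat < a.countP (fun y => decide (y < x)) := by omega
      have := hchar.mp hmc
      rw [hget] at hx
      simp at this
      omega
    rw [pyBisectLeftLoop]
    simp only [dif_pos h]
    rw [show PySem.Int.floordiv (lo + hi) 2 = mid from rfl, if_neg hx]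
    exact ih h0 (by omega) hlo hcle
  | case3 lo hi h =>
    intro h0 hlen hlo hhi
    rw [pyBisectLeftLoop]
    simp only [dif_neg h]
    omega

-- the `_bisect_right` loop returns countP (· ≤ x)
lemma pyBisectRightLoop_eq (a : List Int) (x : Int) (hs : a.Pairwise (· ≤ ·)) :
    ∀ (lo hi : Int), 0 ≤ lo → hi ≤ (a.length : Int) →
      lo ≤ (a.countP (fun y => decide (y ≤ x)) : Int) →
      (a.countP (fun y => decide (y ≤ x)) : Int) ≤ hi →
      pyBisectRightLoop a x lo hi = (a.countP (fun y => decide (y ≤ x)) : Int) := by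
  intro lo hi
  induction lo, hi using pyBisectRightLoop.induct a x with
  | case1 lo hi h mid hx ih =>
    intro h0 hlen hlo hhi
    have hb := PySem.Int.floordiv_two_mid_bounds (le_of_lt h)
    have hltm : mid < hi := by
      rw [show mid = PySem.Int.floordiv (lo + hi) 2 from rfl,
        PySem.Int.floordiv_lt_iff_lt_mul (by omega : (0:Int) < 2)]; omega
    have hmn : mid.toNat < a.length := by omega
    have hget : PySem.List.pyGetD a mid 0 = a[mid.toNat] := by
      exact PySem.List.pyGetD_eq_getElem a 0 (by omega) (by omega)
    have hchar := countP_sorted_char (fun y => decide (y ≤ x)) (by intro y z hyz hz; simp at *; omega) a hs mid.toNat hmn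
    have hcle : (a.countP (fun y => decide (y ≤ x)) : Int) ≤ mid := by
      by_contra hcon
      have hmc : mid.toNat < a.countP (fun y => decide (y ≤ x)) := by omega
      have := hchar.mp hmc
      rw [hget] at hx
      simp at this
      omega
    rw [pyBisectRightLoop]
    simp only [dif_pos h]
    rw [show PySem.Int.floordiv (lo + hi) 2 = mid from rfl, if_pos hx]
    exact ih h0 (by omega) hlo hcle
  | case2 lo hi h mid hx ih =>
    intro h0 hlen hlo hhi
    have hb := PySem.Int.floordiv_two_mid_bounds (le_of_lt h)
    have hltm : mid < hi := by
      rw [show mid = PySem.Int.floordiv (lo + hi) 2 from rfl,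
        PySem.Int.floordiv_lt_iff_lt_mul (by omega : (0:Int) < 2)]; omega
    have hmn : mid.toNat < a.length := by omega
    have hget : PySem.List.pyGetD a mid 0 = a[mid.toNat] := by
      exact PySem.List.pyGetD_eq_getElem a 0 (by omega) (by omega)
    have hchar := countP_sorted_char (fun y => decide (y ≤ x)) (by intro y z hyz hz; simp at *; omega) a hs mid.toNat hmn
    have hlt' : mid < (a.countP (fun y => decide (y ≤ x)) : Int) := by
      rw [hget] at hx
      rw [Int.not_lt] at hx
      have : mid.toNat < a.countP (fun y => decide (y ≤ x)) := hchar.mpr (by simp; omega)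
      omega
    rw [pyBisectRightLoop]
    simp only [dif_pos h]
    rw [show PySem.Int.floordiv (lo + hi) 2 = mid from rfl, if_neg hx]
    exact ih (by omega) hlen (by omega) hhi
  | case3 lo hi h =>
    intro h0 hlen hlo hhi
    rw [pyBisectRightLoop]
    simp only [dif_neg h]
    omega

-- A's inner loop over enumerate(lams) OR-s the window test into the mask, positionwise
lemma inner_fold_eq (wind_lo wind_hi : Int) :
    ∀ (xs : List Int) (s : Nat) (m : List Bool), m.length = s + xs.length →
      (PySem.List.enumerate xs (s : Int)).foldl
          (fun mask il => if wind_lo < il.2 ∧ il.2 < wind_hi then mask.set il.1.toNat true else mask) m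
        = m.take s ++ List.zipWith (fun b v => b || (decide (wind_lo < v) && decide (v < wind_hi))) (m.drop s) xs := by
  intro xs
  induction xs with
  | nil =>
    intro s m hm
    simp only [List.length_nil] at hm
    simp [PySem.List.enumerate_nil, List.take_of_length_le (by omega : m.length ≤ s)]
  | cons v xs ih =>
    intro s m hm
    rw [PySem.List.enumerate_cons]
    have hsm : s < m.length := by simp at hm; omega
    have hcast : ((s : Int) + 1) = ((s + 1 : Nat) : Int) := by push_cast; ring
    simp only [List.foldl_cons, hcast]
    by_cases hc : wind_lo < v ∧ v < wind_hi
    · rw [if_pos hc]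
      have h1 := ih (s+1) (m.set (Int.toNat s) true) (by simp at hm ⊢; omega)
      rw [show (Int.toNat (s : Int)) = s by omega] at h1 ⊢
      rw [h1, List.take_set, List.drop_set, if_pos (by omega : s < s + 1)]
      have htk : (List.take (s+1) m).set s true = List.take s m ++ [true] := by
        rw [List.set_eq_take_cons_drop true (by simp; omega : s < (List.take (s+1) m).length)]
        rw [List.take_take, List.drop_of_length_le (by simp)]
        simp
      rw [htk, List.drop_eq_getElem_cons hsm, List.zipWith_cons_cons]
      simp [hc.1, hc.2]
    · rw [if_neg hc]
      have h1 := ih (s+1) m (by simp at hm ⊢; omega)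
      rw [h1]
      have hbf : (decide (wind_lo < v) && decide (v < wind_hi)) = false := by
        rcases Decidable.not_and_iff_not_or_not.mp hc with h | h <;> simp [h]
      rw [List.drop_eq_getElem_cons hsm, List.zipWith_cons_cons, hbf]
      rw [show List.take (s+1) m = List.take s m ++ m[s]?.toList from List.take_add_one,
        List.getElem?_eq_getElem hsm]
      simp only [Bool.or_false, Option.toList_some, List.append_assoc, List.singleton_append]

-- composing positionwise updates
lemma zipWith_or_zipWith (f g : Bool → Int → Bool) :
    ∀ (m : List Bool) (l : List Int),
      List.zipWith g (List.zipWith f m l) l = List.zipWith (fun b v => g (f b v) v) m l := by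
  intro m
  induction m with
  | nil => intro l; simp
  | cons b m ih =>
    intro l
    cases l with
    | nil => simp
    | cons v l => simp [ih]

lemma zipWith_const_left (m : List Bool) (l : List Int) (hm : m.length = l.length) :
    List.zipWith (fun b (_ : Int) => b) m l = m := by
  induction m generalizing l with
  | nil => simp
  | cons b m ih =>
    cases l with
    | nil => simp at hm
    | cons v l =>
      simp only [List.length_cons] at hm
      simp only [List.zipWith_cons_cons]
      rw [ih l (by omega)]

lemma zipWith_self_map (f : Bool → Int → Bool) (b0 : Bool) (l : List Int) :
    List.zipWith f (l.map (fun _ => b0)) l = l.map (fun v => f b0 v) := by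
  induction l with
  | nil => simp
  | cons v l ih => simp only [List.map_cons, List.zipWith_cons_cons, ih]

-- A computes the per-lam any-window test
lemma create_mask_window_char (lams : List Int) (windows : List (Int × Int)) :
    create_mask_window lams windows
      = lams.map (fun v => windows.any (fun w => decide (w.1 < v) && decide (v < w.2))) := by
  have houter : ∀ (ws : List (Int × Int)) (m : List Bool), m.length = lams.length →
      ws.foldl
        (fun mask window =>
          (PySem.List.enumerate lams 0).foldl
            (fun mask il => if window.1 < il.2 ∧ il.2 < window.2 then mask.set il.1.toNat true else mask) mask) m
      = List.zipWith (fun b v => b || ws.any (fun w => decide (w.1 < v) && decide (v < w.2))) m lams := by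
    intro ws
    induction ws with
    | nil =>
      intro m hm
      simp only [List.foldl_nil, List.any_nil, Bool.or_false]
      exact (zipWith_const_left m lams hm).symm
    | cons w ws ih =>
      intro m hm
      simp only [List.foldl_cons]
      have h0 := inner_fold_eq w.1 w.2 lams 0 m (by omega)
      rw [Nat.cast_zero] at h0
      rw [h0]
      simp only [List.take_zero, List.drop_zero, List.nil_append]
      rw [ih _ (by simp; omega)]
      rw [zipWith_or_zipWith]
      simp only [List.any_cons, Bool.or_assoc]
  show (windows.foldl _ (lams.map (fun _ => false))) = _
  rw [houter windows (lams.map (fun _ => false)) (by simp)]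
  rw [zipWith_self_map]
  simp

-- count comparison over the nonempty windows ⟺ some window strictly contains x
lemma count_lt_iff (x : Int) :
    ∀ (F : List (Int × Int)), (∀ w ∈ F, w.1 < w.2) →
      (F.countP (fun w => decide (w.2 ≤ x)) < F.countP (fun w => decide (w.1 < x)) ↔
        F.any (fun w => decide (w.1 < x) && decide (x < w.2)) = true) := by
  intro F
  induction F with
  | nil => simp
  | cons w F ih =>
    intro hne
    have hw : w.1 < w.2 := hne w (by simp)
    have hF : ∀ u ∈ F, u.1 < u.2 := fun u hu => hne u (by simp [hu])
    have hmono : F.countP (fun w => decide (w.2 ≤ x)) ≤ F.countP (fun w => decide (w.1 < x)) := by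
      apply List.countP_mono_left
      intro u hu h
      simp at h ⊢
      have := hF u hu
      omega
    simp only [List.countP_cons, List.any_cons]
    by_cases h2 : w.2 ≤ x
    · have h1 : w.1 < x := by omega
      have hx2 : ¬ x < w.2 := by omega
      simp [h2, h1, hx2, ih hF]
    · by_cases h1 : w.1 < x
      · have hx2 : x < w.2 := by omega
        simp [h2, h1, hx2]
        omega
      · simp [h2, h1, ih hF]

-- ===== VERDICT (by name: the statement is the Claim_ definition above) =====
theorem create_mask_window_spec : Claim_equal_create_mask_window := by
  unfold Claim_equal_create_mask_window
  intro lams windows _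
  unfold Spec_create_mask_window
  rw [create_mask_window_char]
  have halt : create_mask_window_alt lams windows
      = lams.map (fun x => decide (pyBisectRight
          (PySem.List.sorted ((windows.filter (fun w => decide (w.1 < w.2))).map (fun w => w.2)) (fun v => v) false) x
        < pyBisectLeft
          (PySem.List.sorted ((windows.filter (fun w => decide (w.1 < w.2))).map (fun w => w.1)) (fun v => v) false) x)) := rfl
  rw [halt]
  apply List.map_congr_left
  intro x _
  set F := windows.filter (fun w => decide (w.1 < w.2)) with hF
  have hFlt : ∀ w ∈ F, w.1 < w.2 := by
    intro w hw
    have := List.of_mem_filter hw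
    simpa using this
  have hlosP : (PySem.List.sorted (F.map (fun w => w.1)) (fun v => v) false).Pairwise (· ≤ ·) :=
    PySem.List.sorted_pairwise _ _
  have hhisP : (PySem.List.sorted (F.map (fun w => w.2)) (fun v => v) false).Pairwise (· ≤ ·) :=
    PySem.List.sorted_pairwise _ _
  set los := PySem.List.sorted (F.map (fun w => w.1)) (fun v => v) false with hlos
  set his := PySem.List.sorted (F.map (fun w => w.2)) (fun v => v) false with hhis
  have hbl : pyBisectLeft los x = (los.countP (fun y => decide (y < x)) : Int) := by
    apply pyBisectLeftLoop_eq los x hlosP 0 (los.length : Int) le_rfl le_rfl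
    · exact Int.natCast_nonneg _
    · exact_mod_cast List.countP_le_length
  have hbr : pyBisectRight his x = (his.countP (fun y => decide (y ≤ x)) : Int) := by
    apply pyBisectRightLoop_eq his x hhisP 0 (his.length : Int) le_rfl le_rfl
    · exact Int.natCast_nonneg _
    · exact_mod_cast List.countP_le_length
  have hcl : los.countP (fun y => decide (y < x)) = F.countP (fun w => decide (w.1 < x)) := by
    rw [(PySem.List.sorted_perm _ _ _).countP_eq, List.countP_map]
    rfl
  have hcr : his.countP (fun y => decide (y ≤ x)) = F.countP (fun w => decide (w.2 ≤ x)) := by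
    rw [(PySem.List.sorted_perm _ _ _).countP_eq, List.countP_map]
    rfl
  have hany : windows.any (fun w => decide (w.1 < x) && decide (x < w.2))
      = F.any (fun w => decide (w.1 < x) && decide (x < w.2)) := by
    rw [hF, List.any_filter]
    congr 1
    funext w
    by_cases h1 : w.1 < x <;> by_cases h2 : x < w.2 <;> simp [h1, h2] <;> omega
  rw [hany, hbr, hbl, hcl, hcr]
  have hiff := count_lt_iff x F hFlt
  by_cases hc : F.countP (fun w => decide (w.2 ≤ x)) < F.countP (fun w => decide (w.1 < x))
  · rw [hiff.mp hc]
    simp [hc]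
  · have hfa : F.any (fun w => decide (w.1 < x) && decide (x < w.2)) = false :=
      Bool.eq_false_iff.mpr (fun h => hc (hiff.mpr h))
    rw [hfa]
    simp [hc]
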